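-- pv_equiv track=rewrite | github.com/helloalpaca/Algorithm | baekjoon/2798.py | solution
-- ===== SOURCE A (Python) =====
-- def solution(N, target, cards):
--     answer = 0
--
--     for i in range(N):
--         for j in range(i+1, N):
--             for k in range(j+1, N):
--                 cnt = cards[i]+cards[j]+cards[k]
--                 if cnt <= target and answer < cnt:
--                     answer = cnt
--
--     return answer
-- ===== SOURCE B (Python) =====
-- def solution(N, target, cards):
--     arr = sorted(cards[i] for i in range(N))
--     best = 0
--     for i in range(len(arr)):
--         l, r = i + 1, len(arr) - 1
--         while l < r:
--             s = arr[i] + arr[l] + arr[r]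
--             if s <= target:
--                 if s > best:
--                     best = s
--                 l += 1
--             else:
--                 r -= 1
--     return best
-- ===== Notes on version B (the rewrite author's own statement) =====
-- stated objective: faster
-- what changed: replaces the O(N^3) triple loop with sort-then-fix-one-card-plus-two-pointers (O(N^2)); intended as faster: a timing run measured B 162x faster at n=16384 (the largest size both finished; both time out at n=65536)
-- outside the precondition, e.g. on solution(2, 10, []): A returns 0, B raises IndexError
import Mathlib
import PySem

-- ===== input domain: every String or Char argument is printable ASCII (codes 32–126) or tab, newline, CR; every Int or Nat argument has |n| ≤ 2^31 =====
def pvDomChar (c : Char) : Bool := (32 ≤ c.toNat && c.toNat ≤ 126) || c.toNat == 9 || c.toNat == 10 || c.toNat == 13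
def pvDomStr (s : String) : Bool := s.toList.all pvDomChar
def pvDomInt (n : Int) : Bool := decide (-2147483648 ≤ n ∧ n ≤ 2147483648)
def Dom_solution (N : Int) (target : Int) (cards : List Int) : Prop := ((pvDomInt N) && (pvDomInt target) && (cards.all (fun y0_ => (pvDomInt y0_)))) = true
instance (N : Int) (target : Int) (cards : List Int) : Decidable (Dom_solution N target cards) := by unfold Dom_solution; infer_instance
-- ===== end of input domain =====

-- B replaces A's O(N^3) triple loop by "sort the first N cards, then fix one card and scan with two pointers" (O(N^2); intended as faster — measured 162x at n=16384, the largest size both finished).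

-- ===== PORT A =====
-- cards[i] is ported as pyGetD cards i 0: exact under Pre_solution, where every used index is in range.
def solution (N : Int) (target : Int) (cards : List Int) : Int :=
  (PySem.List.pyRange 0 N 1).foldl (fun answer i =>
    (PySem.List.pyRange (i+1) N 1).foldl (fun answer j =>
      (PySem.List.pyRange (j+1) N 1).foldl (fun answer k =>
        let cnt := PySem.List.pyGetD cards i 0 + PySem.List.pyGetD cards j 0 + PySem.List.pyGetD cards k 0
        if cnt ≤ target ∧ answer < cnt then cnt else answer) answer) answer) 0

-- ===== PORT B =====
-- the inner 'while l < r' two-pointer loop of Source B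
def tpLoop (arr : List Int) (target : Int) (ai : Int) (l : Int) (r : Int) (best : Int) : Int :=
  if h : l < r then
    let s := ai + PySem.List.pyGetD arr l 0 + PySem.List.pyGetD arr r 0
    if s ≤ target then
      tpLoop arr target ai (l + 1) r (if s > best then s else best)
    else
      tpLoop arr target ai l (r - 1) best
  else best
termination_by (r - l).toNat
decreasing_by all_goals omega

def solution_alt (N : Int) (target : Int) (cards : List Int) : Int :=
  let arr := PySem.List.sorted ((PySem.List.pyRange 0 N 1).map (fun i => PySem.List.pyGetD cards i 0)) (fun x => x) false
  (PySem.List.pyRange 0 (arr.length : Int) 1).foldl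
    (fun best i => tpLoop arr target (PySem.List.pyGetD arr i 0) (i + 1) ((arr.length : Int) - 1) best) 0

-- ===== PRECONDITION & SPEC =====
-- Pre_ excludes N > len(cards): for N ≥ 3 the Python A raises IndexError there, and for the remaining
-- degenerate N ≤ 2 (where A returns the trivial 0 without looking at the cards) B's indexing naturally raises.
def Pre_solution (N : Int) (target : Int) (cards : List Int) : Prop := N ≤ (cards.length : Int)
instance (N : Int) (target : Int) (cards : List Int) : Decidable (Pre_solution N target cards) := by unfold Pre_solution; infer_instance
def pvWitness_solution : Int × Int × List Int := (3, 10, [1, 2, 3])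

def Spec_solution (N : Int) (target : Int) (cards : List Int) (out : Int) : Prop := out = solution_alt N target cards
instance (N : Int) (target : Int) (cards : List Int) (out : Int) : Decidable (Spec_solution N target cards out) := by unfold Spec_solution; infer_instance

-- ===== CLAIM (what is proved, stated in full; the proofs are below) =====
def Claim_equal_solution : Prop := ∀ (N : Int) (target : Int) (cards : List Int), Dom_solution N target cards → Pre_solution N target cards → Spec_solution N target cards (solution N target cards)

-- ===== LEMMAS AND PROOFS =====

-- "s is the sum of three cards at distinct (increasing) positions of l"
def HasTriple (l : List Int) (s : Int) : Prop :=
  ∃ i j k : Int, 0 ≤ i ∧ i < j ∧ j < k ∧ k < (l.length : Int) ∧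
    s = PySem.List.pyGetD l i 0 + PySem.List.pyGetD l j 0 + PySem.List.pyGetD l k 0

-- "r is the largest triple sum ≤ T, or 0 if there is none bigger than 0"
def IsBest (T : Int) (l : List Int) (r : Int) : Prop :=
  0 ≤ r ∧ (r = 0 ∨ (r ≤ T ∧ HasTriple l r)) ∧ (∀ s, s ≤ T → HasTriple l s → s ≤ r)

theorem triple_sublist (l : List Int) (i j k : Nat) (hij : i < j) (hjk : j < k) (hk : k < l.length) :
    List.Sublist [l[i]'(by omega), l[j]'(by omega), l[k]'hk] l := by
  have h := List.map_getElem_sublist (l := l) (is := [⟨i, by omega⟩, ⟨j, by omega⟩, ⟨k, hk⟩])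
    (by simp [List.pairwise_cons, Fin.mk_lt_mk]; omega)
  simpa using h

theorem hasTriple_iff_sublist (l : List Int) (s : Int) :
    HasTriple l s ↔ ∃ t, List.Sublist t l ∧ t.length = 3 ∧ t.sum = s := by
  constructor
  · rintro ⟨i, j, k, hi0, hij, hjk, hk, he⟩
    have hkn : k.toNat < l.length := by omega
    have hjn : j.toNat < l.length := by omega
    have hin : i.toNat < l.length := by omega
    refine ⟨[l[i.toNat], l[j.toNat], l[k.toNat]], triple_sublist l i.toNat j.toNat k.toNat (by omega) (by omega) hkn, rfl, ?_⟩
    rw [PySem.List.pyGetD_eq_getElem l 0 (i := i) hi0 (by omega),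
        PySem.List.pyGetD_eq_getElem l 0 (i := j) (by omega) (by omega),
        PySem.List.pyGetD_eq_getElem l 0 (i := k) (by omega) hk] at he
    simp [he]
    ring
  · rintro ⟨t, hsub, hlen, hsum⟩
    obtain ⟨is, hmap, hpw⟩ := List.sublist_eq_map_getElem hsub
    rcases is with _ | ⟨a, _ | ⟨b, _ | ⟨c, _ | d⟩⟩⟩ <;> simp_all
    refine ⟨((a : Nat) : Int), ((b : Nat) : Int), ((c : Nat) : Int), by omega, ?_, ?_, by exact_mod_cast c.isLt, ?_⟩
    · exact_mod_cast hpw.1.1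
    · exact_mod_cast hpw.2
    · rw [PySem.List.pyGetD_eq_getElem l 0 (i := ((a : Nat) : Int)) (by omega) (by exact_mod_cast a.isLt),
          PySem.List.pyGetD_eq_getElem l 0 (i := ((b : Nat) : Int)) (by omega) (by exact_mod_cast b.isLt),
          PySem.List.pyGetD_eq_getElem l 0 (i := ((c : Nat) : Int)) (by omega) (by exact_mod_cast c.isLt)]
      simp only [Int.toNat_natCast]
      omega

theorem hasTriple_perm {l l' : List Int} (h : l.Perm l') {s : Int} :
    HasTriple l s → HasTriple l' s := by
  intro ht
  obtain ⟨t, hsub, hlen, hsum⟩ := (hasTriple_iff_sublist l s).1 ht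
  obtain ⟨t', hperm, hsub'⟩ := hsub.subperm.trans h.subperm
  exact (hasTriple_iff_sublist l' s).2 ⟨t', hsub', by rw [hperm.length_eq, hlen], by rw [hperm.sum_eq, hsum]⟩

theorem isBest_unique {T : Int} {l : List Int} {r1 r2 : Int}
    (h1 : IsBest T l r1) (h2 : IsBest T l r2) : r1 = r2 := by
  obtain ⟨h10, h1c, h1m⟩ := h1
  obtain ⟨h20, h2c, h2m⟩ := h2
  have hle1 : r1 ≤ r2 := by
    rcases h1c with h | ⟨hT, ht⟩
    · omega
    · exact h2m r1 hT ht
  have hle2 : r2 ≤ r1 := by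
    rcases h2c with h | ⟨hT, ht⟩
    · omega
    · exact h1m r2 hT ht
  omega

theorem isBest_perm {T : Int} {l l' : List Int} (h : l.Perm l') {r : Int}
    (hb : IsBest T l r) : IsBest T l' r := by
  obtain ⟨h0, hc, hm⟩ := hb
  refine ⟨h0, ?_, ?_⟩
  · rcases hc with h' | ⟨hT, ht⟩
    · exact Or.inl h'
    · exact Or.inr ⟨hT, hasTriple_perm h ht⟩
  · exact fun s hsT hts => hm s hsT (hasTriple_perm h.symm hts)

-- ---- A side ----

-- the update of A's accumulator
def step (T : Int) (a : Int) (s : Int) : Int := if s ≤ T ∧ a < s then s else a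

theorem le_step (T a s : Int) : a ≤ step T a s := by
  unfold step; split_ifs with h
  · omega
  · omega

theorem le_foldl_step (T : Int) (l : List Int) (a : Int) : a ≤ l.foldl (step T) a := by
  induction l generalizing a with
  | nil => simp
  | cons x l ih => exact le_trans (le_step T a x) (by simpa using ih (step T a x))

theorem foldl_step_cases (T : Int) (l : List Int) (a : Int) :
    l.foldl (step T) a = a ∨ (l.foldl (step T) a ∈ l ∧ l.foldl (step T) a ≤ T) := by
  induction l generalizing a with
  | nil => simp
  | cons x l ih =>
    simp only [List.foldl_cons]
    rcases ih (step T a x) with h | ⟨hm, hT⟩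
    · rw [h]
      unfold step
      split_ifs with hc
      · exact Or.inr ⟨List.mem_cons_self, hc.1⟩
      · exact Or.inl rfl
    · exact Or.inr ⟨List.mem_cons_of_mem _ hm, hT⟩

theorem foldl_step_ge (T : Int) (l : List Int) (a : Int) {s : Int} (hs : s ∈ l) (hsT : s ≤ T) :
    s ≤ l.foldl (step T) a := by
  induction l generalizing a with
  | nil => simp at hs
  | cons x l ih =>
    simp only [List.foldl_cons]
    rcases List.mem_cons.1 hs with h | h
    · subst h
      refine le_trans ?_ (le_foldl_step T l (step T a s))
      unfold step
      split_ifs with hc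
      · omega
      · omega
    · exact ih (step T a x) h

def bigList (N : Int) (c : Int → Int) : List Int :=
  (PySem.List.pyRange 0 N 1).flatMap (fun i =>
    (PySem.List.pyRange (i+1) N 1).flatMap (fun j =>
      (PySem.List.pyRange (j+1) N 1).map (fun k => c i + c j + c k)))

theorem solution_eq_foldl_bigList (N T : Int) (cards : List Int) :
    solution N T cards = (bigList N (fun i => PySem.List.pyGetD cards i 0)).foldl (step T) 0 := by
  simp only [solution, bigList, List.foldl_flatMap, List.foldl_map, step]

theorem mem_bigList (N : Int) (c : Int → Int) (s : Int) :
    s ∈ bigList N c ↔ ∃ i j k : Int, 0 ≤ i ∧ i < j ∧ j < k ∧ k < N ∧ s = c i + c j + c k := by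
  simp only [bigList, List.mem_flatMap, List.mem_map, PySem.List.mem_pyRange_one]
  constructor
  · rintro ⟨i, ⟨hi0, hiN⟩, j, ⟨hj1, hjN⟩, k, ⟨hk1, hkN⟩, he⟩
    exact ⟨i, j, k, hi0, by omega, by omega, hkN, he.symm⟩
  · rintro ⟨i, j, k, hi0, hij, hjk, hkN, he⟩
    exact ⟨i, ⟨hi0, by omega⟩, j, ⟨by omega, by omega⟩, k, ⟨by omega, hkN⟩, he.symm⟩

theorem A_isBest (N T : Int) (cards : List Int) :
    IsBest T ((PySem.List.pyRange 0 N 1).map (fun i => PySem.List.pyGetD cards i 0))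
      (solution N T cards) := by
  set c : Int → Int := fun i => PySem.List.pyGetD cards i 0 with hc
  set xs : List Int := (PySem.List.pyRange 0 N 1).map c with hxs
  have hlen : xs.length = (N - 0).toNat := by
    simp [hxs, PySem.List.length_pyRange_one]
  have hget : ∀ i : Int, 0 ≤ i → i < N → PySem.List.pyGetD xs i 0 = c i := by
    intro i h0 hN
    exact PySem.List.pyGetD_map_pyRange_of_nonneg c N i 0 h0 hN
  rw [solution_eq_foldl_bigList]
  refine ⟨le_foldl_step T _ 0, ?_, ?_⟩
  · rcases foldl_step_cases T (bigList N c) 0 with h | ⟨hm, hT⟩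
    · exact Or.inl h
    · obtain ⟨i, j, k, hi0, hij, hjk, hkN, he⟩ := (mem_bigList N c _).1 hm
      refine Or.inr ⟨hT, i, j, k, hi0, hij, hjk, by omega, ?_⟩
      rw [hget i hi0 (by omega), hget j (by omega) (by omega), hget k (by omega) hkN]
      exact he
  · rintro s hsT ⟨i, j, k, hi0, hij, hjk, hkN, he⟩
    refine foldl_step_ge T _ 0 ?_ hsT
    rw [mem_bigList]
    refine ⟨i, j, k, hi0, hij, hjk, by omega, ?_⟩
    rw [hget i hi0 (by omega), hget j (by omega) (by omega), hget k (by omega) (by omega)] at he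
    exact he

-- ---- B side ----

theorem tpLoop_ge (arr : List Int) (T ai l r best : Int) : best ≤ tpLoop arr T ai l r best := by
  fun_induction tpLoop arr T ai l r best with
  | case1 l r best h s hs ih => exact le_trans (by split_ifs <;> omega) ih
  | case2 l r best h s hs ih => exact ih
  | case3 l r best h => exact le_refl best

theorem tpLoop_cases (arr : List Int) (T ai l r best : Int) :
    tpLoop arr T ai l r best = best ∨
      (tpLoop arr T ai l r best ≤ T ∧ ∃ p q : Int, l ≤ p ∧ p < q ∧ q ≤ r ∧
        tpLoop arr T ai l r best = ai + PySem.List.pyGetD arr p 0 + PySem.List.pyGetD arr q 0) := by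
  fun_induction tpLoop arr T ai l r best with
  | case1 l r best h s hs ih =>
    rcases ih with h1 | ⟨hT, p, q, hp, hpq, hq, he⟩
    · by_cases hsb : s > best
      · right
        simp only [hsb, if_true, dite_eq_ite] at h1 ⊢
        exact ⟨by omega, l, r, le_refl l, h, le_refl r, by omega⟩
      · left
        simp only [hsb, if_false, dite_eq_ite] at h1 ⊢
        exact h1
    · exact Or.inr ⟨hT, p, q, by omega, hpq, hq, he⟩
  | case2 l r best h s hs ih =>
    rcases ih with h1 | ⟨hT, p, q, hp, hpq, hq, he⟩
    · exact Or.inl h1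
    · exact Or.inr ⟨hT, p, q, hp, hpq, by omega, he⟩
  | case3 l r best h => exact Or.inl rfl

theorem tpLoop_le (arr : List Int)
    (hmono : ∀ p q : Int, 0 ≤ p → p ≤ q → q < (arr.length : Int) →
      PySem.List.pyGetD arr p 0 ≤ PySem.List.pyGetD arr q 0)
    (T ai l r best : Int) :
    0 ≤ l → r < (arr.length : Int) → ∀ p q : Int, l ≤ p → p < q → q ≤ r →
    ai + PySem.List.pyGetD arr p 0 + PySem.List.pyGetD arr q 0 ≤ T →
    ai + PySem.List.pyGetD arr p 0 + PySem.List.pyGetD arr q 0 ≤ tpLoop arr T ai l r best := by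
  fun_induction tpLoop arr T ai l r best with
  | case1 l r best h s hs ih =>
    intro hl hr p q hp hpq hq hT
    by_cases hpl : p = l
    · subst hpl
      have h1 : PySem.List.pyGetD arr q 0 ≤ PySem.List.pyGetD arr r 0 :=
        hmono q r (by omega) hq hr
      have h2 : s ≤ tpLoop arr T ai (p + 1) r (if s > best then s else best) :=
        le_trans (by split_ifs <;> omega) (tpLoop_ge arr T ai (p + 1) r _)
      omega
    · exact ih (by omega) hr p q (by omega) hpq hq hT
  | case2 l r best h s hs ih =>
    intro hl hr p q hp hpq hq hT
    by_cases hqr : q = r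
    · subst hqr
      have h1 : PySem.List.pyGetD arr l 0 ≤ PySem.List.pyGetD arr p 0 :=
        hmono l p hl hp (by omega)
      omega
    · exact ih hl (by omega) p q hp hpq (by omega) hT
  | case3 l r best h =>
    intro hl hr p q hp hpq hq hT
    omega

theorem foldl_ge {α : Type} (g : Int → α → Int) (l : List α)
    (h : ∀ a x, a ≤ g a x) (a : Int) : a ≤ l.foldl g a := by
  induction l generalizing a with
  | nil => simp
  | cons x l ih => exact le_trans (h a x) (by simpa using ih (g a x))

theorem outer_cases_gen (arr : List Int) (T : Int) (ran : List Int) (best : Int) :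
    ran.foldl (fun best i => tpLoop arr T (PySem.List.pyGetD arr i 0) (i + 1) ((arr.length : Int) - 1) best) best = best ∨
      (ran.foldl (fun best i => tpLoop arr T (PySem.List.pyGetD arr i 0) (i + 1) ((arr.length : Int) - 1) best) best ≤ T ∧
       ∃ i p q : Int, i ∈ ran ∧ i < p ∧ p < q ∧ q ≤ (arr.length : Int) - 1 ∧
         ran.foldl (fun best i => tpLoop arr T (PySem.List.pyGetD arr i 0) (i + 1) ((arr.length : Int) - 1) best) best
           = PySem.List.pyGetD arr i 0 + PySem.List.pyGetD arr p 0 + PySem.List.pyGetD arr q 0) := by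
  induction ran generalizing best with
  | nil => exact Or.inl rfl
  | cons a rest ih =>
    simp only [List.foldl_cons]
    rcases ih (tpLoop arr T (PySem.List.pyGetD arr a 0) (a + 1) ((arr.length : Int) - 1) best) with h1 | ⟨hT, i, p, q, hi, hip, hpq, hq, he⟩
    · rw [h1]
      rcases tpLoop_cases arr T (PySem.List.pyGetD arr a 0) (a + 1) ((arr.length : Int) - 1) best with h2 | ⟨hT, p, q, hp, hpq, hq, he⟩
      · exact Or.inl h2
      · exact Or.inr ⟨hT, a, p, q, List.mem_cons_self, by omega, hpq, hq, he⟩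
    · exact Or.inr ⟨hT, i, p, q, List.mem_cons_of_mem a hi, hip, hpq, hq, he⟩

theorem outer_le_gen (arr : List Int)
    (hmono : ∀ p q : Int, 0 ≤ p → p ≤ q → q < (arr.length : Int) →
      PySem.List.pyGetD arr p 0 ≤ PySem.List.pyGetD arr q 0)
    (T : Int) (ran : List Int) (best : Int) (i p q : Int)
    (hi : i ∈ ran) (hi0 : 0 ≤ i) (hip : i < p) (hpq : p < q) (hq : q < (arr.length : Int))
    (hT : PySem.List.pyGetD arr i 0 + PySem.List.pyGetD arr p 0 + PySem.List.pyGetD arr q 0 ≤ T) :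
    PySem.List.pyGetD arr i 0 + PySem.List.pyGetD arr p 0 + PySem.List.pyGetD arr q 0 ≤
      ran.foldl (fun best i => tpLoop arr T (PySem.List.pyGetD arr i 0) (i + 1) ((arr.length : Int) - 1) best) best := by
  induction ran generalizing best with
  | nil => simp at hi
  | cons a rest ih =>
    simp only [List.foldl_cons]
    rcases List.mem_cons.1 hi with h | h
    · subst h
      refine le_trans (tpLoop_le arr hmono T (PySem.List.pyGetD arr i 0) (i + 1) ((arr.length : Int) - 1) best
        (by omega) (by omega) p q (by omega) hpq (by omega) hT) ?_
      exact foldl_ge _ rest (fun a x => tpLoop_ge arr T (PySem.List.pyGetD arr x 0) (x + 1) ((arr.length : Int) - 1) a) _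
    · exact ih _ h

theorem B_isBest (T : Int) (arr : List Int)
    (hmono : ∀ p q : Int, 0 ≤ p → p ≤ q → q < (arr.length : Int) →
      PySem.List.pyGetD arr p 0 ≤ PySem.List.pyGetD arr q 0) :
    IsBest T arr ((PySem.List.pyRange 0 (arr.length : Int) 1).foldl
      (fun best i => tpLoop arr T (PySem.List.pyGetD arr i 0) (i + 1) ((arr.length : Int) - 1) best) 0) := by
  refine ⟨foldl_ge _ _ (fun a x => tpLoop_ge arr T (PySem.List.pyGetD arr x 0) (x + 1) ((arr.length : Int) - 1) a) 0, ?_, ?_⟩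
  · rcases outer_cases_gen arr T (PySem.List.pyRange 0 (arr.length : Int) 1) 0 with h | ⟨hT, i, p, q, hi, hip, hpq, hq, he⟩
    · exact Or.inl h
    · obtain ⟨hi0, _⟩ := (PySem.List.mem_pyRange_one).1 hi
      exact Or.inr ⟨hT, i, p, q, hi0, hip, hpq, by omega, he⟩
  · rintro s hsT ⟨i, j, k, hi0, hij, hjk, hk, he⟩
    rw [he]
    exact outer_le_gen arr hmono T _ 0 i j k ((PySem.List.mem_pyRange_one).2 ⟨hi0, by omega⟩)
      hi0 hij hjk hk (by omega)

-- ===== VERDICT (by name: the statement is the Claim_ definition above) =====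
theorem solution_spec : Claim_equal_solution := by
  intro N T cards _hdom _hpre
  unfold Spec_solution
  have hA := A_isBest N T cards
  set xs : List Int := (PySem.List.pyRange 0 N 1).map (fun i => PySem.List.pyGetD cards i 0) with hxs
  set arr : List Int := PySem.List.sorted xs (fun x => x) false with harr
  have hperm : arr.Perm xs := PySem.List.sorted_perm xs (fun x => x) false
  have hmono : ∀ p q : Int, 0 ≤ p → p ≤ q → q < (arr.length : Int) →
      PySem.List.pyGetD arr p 0 ≤ PySem.List.pyGetD arr q 0 := by
    intro p q hp hpq hq
    rw [PySem.List.pyGetD_eq_getElem arr 0 (i := p) hp (by omega),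
        PySem.List.pyGetD_eq_getElem arr 0 (i := q) (by omega) hq]
    exact PySem.List.sorted_id_getElem_mono xs (by omega) (by rw [harr] at hq; omega)
  have hB := B_isBest T arr hmono
  exact isBest_unique hA (isBest_perm hperm hB)
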